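-- pv_equiv track=rewrite | github.com/Klaudia1303/student_code_analysis | Progetto-tirocinio2024/data/student_data/2061348_Carnevali/LabPython07/A_Ex9.py | A_Ex9
-- ===== SOURCE A (Python) =====
-- def A_Ex9(l):
--     l1=[]
--     for n in range(len(l)):
--         x=0
--         s='\U000f423f'
--         for m in range(len(l[n])):
--             y=int(l[n].count(l[n][m]))
--             if y>x:
--                 x=y
--                 s=l[n][m]
--             elif y==x and ord(s)>ord(l[n][m]):
--                 x=y
--                 s=l[n][m]
--         l1.append(s)
--     return l1
--     """MODIFICARE IL CONTENUTO DI QUESTA FUNZIONE PER SVOLGERE L'ESERCIZIO"""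
-- ===== SOURCE B (Python) =====
-- def A_Ex9(l):
--     out = []
--     for s in l:
--         best_count = 0
--         best = '\U000f423f'
--         chars = sorted(s)
--         i = 0
--         while i < len(chars):
--             j = i
--             while j < len(chars) and chars[j] == chars[i]:
--                 j += 1
--             if j - i > best_count:
--                 best_count = j - i
--                 best = chars[i]
--             i = j
--         out.append(best)
--     return out
-- ===== Notes on version B (the rewrite author's own statement) =====
-- stated objective: alternative
-- what changed: A calls count() for every position of the string (quadratic per string); B sorts each string's characters once and scans the sorted sequence as runs of equal characters, keeping the first strictly longest run, which is the smallest-ordinal tie winner.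
import Mathlib
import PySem

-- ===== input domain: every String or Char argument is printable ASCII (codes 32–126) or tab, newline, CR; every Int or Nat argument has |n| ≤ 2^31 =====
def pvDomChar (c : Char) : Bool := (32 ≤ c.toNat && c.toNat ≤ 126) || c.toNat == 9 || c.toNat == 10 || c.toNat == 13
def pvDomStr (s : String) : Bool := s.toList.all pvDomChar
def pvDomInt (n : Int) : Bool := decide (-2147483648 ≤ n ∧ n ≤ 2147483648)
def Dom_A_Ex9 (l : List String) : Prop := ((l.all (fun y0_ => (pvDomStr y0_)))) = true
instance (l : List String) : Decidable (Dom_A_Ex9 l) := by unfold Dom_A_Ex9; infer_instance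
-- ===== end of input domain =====

-- B replaces A's per-position count-and-compare scan (quadratic per string) by sort-then-run-scan
-- over the sorted characters; same return value, a different traversal.

-- ===== PORT A =====
-- the body of A's inner loop: y = int(l[n].count(l[n][m])); if y>x …; elif y==x and ord(s)>ord(c) …
def stepA (cs : List Char) (p : Int × Char) (c : Char) : Int × Char :=
  if (PySem.List.count cs c : Int) > p.1 then ((PySem.List.count cs c : Int), c)
  else if (PySem.List.count cs c : Int) = p.1 ∧ p.2.toNat > c.toNat then ((PySem.List.count cs c : Int), c)
  else p

def A_Ex9 (l : List String) : List String :=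
  (PySem.List.pyRange 0 (l.length : Int) 1).foldl (fun l1 n =>
    let cs := (PySem.List.pyGetD l n "").toList
    let st := (PySem.List.pyRange 0 (cs.length : Int) 1).foldl
      (fun (p : Int × Char) m => stepA cs p (PySem.List.pyGetD cs m ' '))
      ((0 : Int), Char.ofNat 999999)
    l1 ++ [String.ofList [st.2]]) []

-- ===== PORT B =====
-- run scan over the sorted characters: k = length of the leading run, keep it iff strictly longer
def bestRun : List Char → Int → Char → Char
  | [], _, best => best
  | c :: rest, bc, best =>
    -- k = 1 + length of the equal prefix; chars[k:] = the dropWhile tail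
    if ((1 + (rest.takeWhile (fun x => x == c)).length : Nat) : Int) > bc then
      bestRun (rest.dropWhile (fun x => x == c))
        ((1 + (rest.takeWhile (fun x => x == c)).length : Nat) : Int) c
    else
      bestRun (rest.dropWhile (fun x => x == c)) bc best
termination_by cs => cs.length
decreasing_by
  all_goals
    simp only [List.length_cons]
    exact Nat.lt_succ_of_le (List.length_dropWhile_le _ _)

def A_Ex9_alt (l : List String) : List String :=
  l.map (fun s =>
    String.ofList [bestRun (PySem.List.sorted s.toList (fun c => c.toNat)) 0 (Char.ofNat 999999)])

-- ===== PRECONDITION & SPEC =====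
def Spec_A_Ex9 (l : List String) (out : List String) : Prop := out = A_Ex9_alt l
instance (l : List String) (out : List String) : Decidable (Spec_A_Ex9 l out) := by unfold Spec_A_Ex9; infer_instance

-- ===== CLAIM (what is proved, stated in full; the proofs are below) =====
def Claim_equal_A_Ex9 : Prop := ∀ (l : List String), Dom_A_Ex9 l → Spec_A_Ex9 l (A_Ex9 l)

-- ===== LEMMAS AND PROOFS =====

-- the unique character both loops converge to: maximal count, smallest ordinal among ties
def BestChar (cs : List Char) (b : Char) : Prop :=
  b ∈ cs ∧ ∀ c ∈ cs, PySem.List.count cs c < PySem.List.count cs b ∨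
    (PySem.List.count cs c = PySem.List.count cs b ∧ b.toNat ≤ c.toNat)

lemma char_toNat_inj {a b : Char} (h : a.toNat = b.toNat) : a = b := by
  apply Char.ext; exact UInt32.toNat_inj.mp h

lemma bestChar_unique {cs : List Char} {b1 b2 : Char}
    (h1 : BestChar cs b1) (h2 : BestChar cs b2) : b1 = b2 := by
  obtain ⟨m1, p1⟩ := h1
  obtain ⟨m2, p2⟩ := h2
  rcases p1 b2 m2 with h | ⟨hc, ho⟩ <;> rcases p2 b1 m1 with h' | ⟨hc', ho'⟩ <;>
    first
      | omega
      | exact char_toNat_inj (by omega)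

-- A-side loop invariant
def InvA (cs seen : List Char) (st : Int × Char) : Prop :=
  st.1 = (PySem.List.count cs st.2 : Int) ∧ (st.2 ∈ cs ∨ st.2 = Char.ofNat 999999) ∧
  ∀ c ∈ seen, (PySem.List.count cs c : Int) < st.1 ∨
    ((PySem.List.count cs c : Int) = st.1 ∧ st.2.toNat ≤ c.toNat)

lemma invA_step {cs seen : List Char} {st : Int × Char} {c : Char}
    (h : InvA cs seen st) (hc : c ∈ cs) : InvA cs (seen ++ [c]) (stepA cs st c) := by
  obtain ⟨hx, hmem, hall⟩ := h
  have hmem' : ∀ d : Char, d ∈ seen ++ [c] → d ∈ seen ∨ d = c := by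
    intro d hd
    rcases List.mem_append.mp hd with hd | hd
    · exact Or.inl hd
    · exact Or.inr (List.mem_singleton.mp hd)
  unfold stepA
  split_ifs with h1 h2
  · refine ⟨rfl, Or.inl hc, ?_⟩
    intro d hd
    dsimp only
    rcases hmem' d hd with hd | hd
    · rcases hall d hd with h' | ⟨h', _⟩ <;> left <;> omega
    · subst hd; right; exact ⟨rfl, le_refl _⟩
  · refine ⟨rfl, Or.inl hc, ?_⟩
    intro d hd
    dsimp only
    obtain ⟨h2a, h2b⟩ := h2
    rcases hmem' d hd with hd | hd
    · rcases hall d hd with h' | ⟨h', hord⟩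
      · left; omega
      · right; exact ⟨by omega, by omega⟩
    · subst hd; right; exact ⟨rfl, le_refl _⟩
  · refine ⟨hx, hmem, ?_⟩
    intro d hd
    rcases hmem' d hd with hd | hd
    · exact hall d hd
    · subst hd
      by_cases he : (PySem.List.count cs d : Int) = st.1
      · right; exact ⟨he, by omega⟩
      · left; omega

lemma foldA_inv (cs : List Char) (hsent : Char.ofNat 999999 ∉ cs) :
    ∀ p : List Char, (∀ c ∈ p, c ∈ cs) →
      InvA cs p (p.foldl (stepA cs) ((0 : Int), Char.ofNat 999999)) := by
  intro p
  induction p using List.reverseRecOn with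
  | nil =>
    intro _
    refine ⟨?_, Or.inr rfl, by simp⟩
    simp [PySem.List.count, List.count_eq_zero.mpr hsent]
  | append_singleton q c ih =>
    intro hsub
    rw [List.foldl_append, List.foldl_cons, List.foldl_nil]
    exact invA_step (ih (fun d hd => hsub d (List.mem_append_left _ hd)))
      (hsub c (List.mem_append_right _ (List.mem_singleton_self c)))

lemma foldA_best (cs : List Char) (hsent : Char.ofNat 999999 ∉ cs) (hne : cs ≠ []) :
    BestChar cs (cs.foldl (stepA cs) ((0 : Int), Char.ofNat 999999)).2 := by
  obtain ⟨hx, hmem, hall⟩ := foldA_inv cs hsent cs (fun _ h => h)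
  set st := cs.foldl (stepA cs) ((0 : Int), Char.ofNat 999999)
  rcases hmem with hmem | hmem
  · refine ⟨hmem, ?_⟩
    intro c hc
    rcases hall c hc with h | ⟨h, ho⟩
    · left; omega
    · right; exact ⟨by omega, ho⟩
  · exfalso
    obtain ⟨c, hc⟩ := List.exists_mem_of_ne_nil cs hne
    have hcount : 0 < PySem.List.count cs c := by
      simpa [PySem.List.count] using List.count_pos_iff.mpr hc
    have h0 : st.1 = 0 := by
      rw [hx, hmem]
      simp [PySem.List.count, List.count_eq_zero.mpr hsent]
    rcases hall c hc with h | ⟨h, _⟩ <;> omega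

-- B-side facts about runs in a sorted list
lemma dropWhile_gt (c : Char) (rest : List Char)
    (hs : List.Pairwise (fun a b : Char => a.toNat ≤ b.toNat) (c :: rest)) :
    ∀ x ∈ rest.dropWhile (fun x => x == c), c.toNat < x.toNat := by
  rw [List.pairwise_cons] at hs
  obtain ⟨hall, hrest⟩ := hs
  cases hdw : rest.dropWhile (fun x => x == c) with
  | nil => simp
  | cons e tail =>
    have hpe : (e == c) = false := by
      have h := List.head?_dropWhile_not (fun x => x == c) rest
      rw [hdw] at h
      simpa using h
    have hec : e ≠ c := by simpa using hpe
    have hsub : (e :: tail).Sublist rest := hdw ▸ List.dropWhile_sublist _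
    have hce : c.toNat < e.toNat := by
      have h1 : c.toNat ≤ e.toNat := hall e (hsub.mem (List.mem_cons_self ..))
      rcases Nat.lt_or_eq_of_le h1 with h | h
      · exact h
      · exact absurd (char_toNat_inj h.symm) hec
    have hp : List.Pairwise (fun a b : Char => a.toNat ≤ b.toNat) (e :: tail) :=
      List.Pairwise.sublist hsub hrest
    rw [List.pairwise_cons] at hp
    intro x hx
    rcases List.mem_cons.mp hx with hx | hx
    · exact hx ▸ hce
    · exact Nat.lt_of_lt_of_le hce (hp.1 x hx)

lemma count_head_sorted (c : Char) (rest : List Char)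
    (hs : List.Pairwise (fun a b : Char => a.toNat ≤ b.toNat) (c :: rest)) :
    PySem.List.count (c :: rest) c = 1 + (rest.takeWhile (fun x => x == c)).length := by
  have hgt := dropWhile_gt c rest hs
  have hdw : List.count c (rest.dropWhile (fun x => x == c)) = 0 := by
    refine List.count_eq_zero.mpr fun hmem => ?_
    exact absurd (hgt c hmem) (lt_irrefl _)
  have htw : List.count c (rest.takeWhile (fun x => x == c)) =
      (rest.takeWhile (fun x => x == c)).length := by
    refine List.count_eq_length.mpr fun b hb => ?_
    have hb' : b = c := by simpa using List.mem_takeWhile_imp hb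
    simp [hb']
  have hsplit : List.count c rest =
      List.count c (rest.takeWhile (fun x => x == c)) +
      List.count c (rest.dropWhile (fun x => x == c)) := by
    conv_lhs => rw [← List.takeWhile_append_dropWhile (p := fun x => x == c) (l := rest)]
    exact List.count_append ..
  simp only [PySem.List.count, List.count_cons_self, hsplit, htw, hdw]
  omega

lemma count_tail_sorted (c d : Char) (rest : List Char)
    (hd : d ∈ rest.dropWhile (fun x => x == c))
    (hs : List.Pairwise (fun a b : Char => a.toNat ≤ b.toNat) (c :: rest)) :
    PySem.List.count (c :: rest) d = PySem.List.count (rest.dropWhile (fun x => x == c)) d := by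
  have hdc : d ≠ c := fun h => absurd (h ▸ dropWhile_gt c rest hs d hd) (lt_irrefl _)
  have htw : List.count d (rest.takeWhile (fun x => x == c)) = 0 := by
    refine List.count_eq_zero.mpr fun hmem => ?_
    have := List.mem_takeWhile_imp hmem
    exact hdc (by simpa using this)
  have hsplit : List.count d rest =
      List.count d (rest.takeWhile (fun x => x == c)) +
      List.count d (rest.dropWhile (fun x => x == c)) := by
    conv_lhs => rw [← List.takeWhile_append_dropWhile (p := fun x => x == c) (l := rest)]
    exact List.count_append ..
  have hcd : ¬ (c = d) := fun h => hdc h.symm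
  simp [PySem.List.count, hsplit, htw, hcd]

lemma mem_cases_sorted (c d : Char) (rest : List Char) (hd : d ∈ c :: rest) :
    d = c ∨ d ∈ rest.dropWhile (fun x => x == c) := by
  rcases List.mem_cons.mp hd with hd | hd
  · exact Or.inl hd
  · rw [← List.takeWhile_append_dropWhile (p := fun x => x == c) (l := rest)] at hd
    rcases List.mem_append.mp hd with hd | hd
    · exact Or.inl (by simpa using List.mem_takeWhile_imp hd)
    · exact Or.inr hd

lemma bestRun_spec : ∀ (scs : List Char) (bc : Int) (best : Char),
    List.Pairwise (fun a b : Char => a.toNat ≤ b.toNat) scs →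
    (bestRun scs bc best = best ∧ ∀ d ∈ scs, (PySem.List.count scs d : Int) ≤ bc) ∨
    (bestRun scs bc best ∈ scs ∧ bc < (PySem.List.count scs (bestRun scs bc best) : Int) ∧
      ∀ d ∈ scs, PySem.List.count scs d < PySem.List.count scs (bestRun scs bc best) ∨
        (PySem.List.count scs d = PySem.List.count scs (bestRun scs bc best) ∧
          (bestRun scs bc best).toNat ≤ d.toNat)) := by
  intro scs bc best
  induction scs, bc, best using bestRun.induct with
  | case1 =>
    intro _
    left
    exact ⟨by rw [bestRun], by simp⟩
  | case2 c rest bc best hk ih =>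
    intro hs
    have hrw : bestRun (c :: rest) bc best =
        bestRun (rest.dropWhile (fun x => x == c))
          ((1 + (rest.takeWhile (fun x => x == c)).length : Nat) : Int) c := by
      rw [bestRun]
      simp only [if_pos hk]
    have hs' : List.Pairwise (fun a b : Char => a.toNat ≤ b.toNat)
        (rest.dropWhile (fun x => x == c)) :=
      List.Pairwise.sublist ((List.dropWhile_sublist _).cons _) hs
    have hhead := count_head_sorted c rest hs
    right
    rw [hrw]
    rcases ih hs' with ⟨heq, hall⟩ | ⟨hmem, hgt, hall⟩
    · -- the recursive call kept c
      rw [heq]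
      have hcc : PySem.List.count (c :: rest) c = 1 + (rest.takeWhile (fun x => x == c)).length :=
        hhead
      refine ⟨List.mem_cons_self .., by rw [hcc]; exact_mod_cast hk, ?_⟩
      intro d hd
      rcases mem_cases_sorted c d rest hd with hd' | hd'
      · subst hd'; right; exact ⟨rfl, le_refl _⟩
      · have hcount := count_tail_sorted c d rest hd' hs
        have hle := hall d hd'
        rw [hcc, hcount]
        by_cases he : PySem.List.count (rest.dropWhile (fun x => x == c)) d =
            1 + (rest.takeWhile (fun x => x == c)).length
        · right
          exact ⟨he, Nat.le_of_lt (dropWhile_gt c rest hs d hd')⟩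
        · left; omega
    · -- the recursive call found a strictly longer run in the tail
      have hbmem : bestRun (rest.dropWhile (fun x => x == c))
          ((1 + (rest.takeWhile (fun x => x == c)).length : Nat) : Int) c ∈
          rest.dropWhile (fun x => x == c) := hmem
      have hbc := count_tail_sorted c _ rest hbmem hs
      refine ⟨List.mem_cons.mpr (Or.inr ((List.dropWhile_sublist _).mem hbmem)), ?_, ?_⟩
      · rw [hbc]; omega
      · intro d hd
        rcases mem_cases_sorted c d rest hd with hd' | hd'
        · subst hd'
          left
          rw [hbc, hhead]
          exact_mod_cast hgt
        · have hcount := count_tail_sorted c d rest hd' hs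
          rw [hbc, hcount]
          exact hall d hd'
  | case3 c rest bc best hk ih =>
    intro hs
    have hrw : bestRun (c :: rest) bc best =
        bestRun (rest.dropWhile (fun x => x == c)) bc best := by
      rw [bestRun]
      simp only [if_neg hk]
    have hs' : List.Pairwise (fun a b : Char => a.toNat ≤ b.toNat)
        (rest.dropWhile (fun x => x == c)) :=
      List.Pairwise.sublist ((List.dropWhile_sublist _).cons _) hs
    have hhead := count_head_sorted c rest hs
    rw [hrw]
    rcases ih hs' with ⟨heq, hall⟩ | ⟨hmem, hgt, hall⟩
    · left
      refine ⟨heq, ?_⟩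
      intro d hd
      rcases mem_cases_sorted c d rest hd with hd' | hd'
      · subst hd'; rw [hhead]; omega
      · rw [count_tail_sorted c d rest hd' hs]
        exact hall d hd'
    · right
      have hbc := count_tail_sorted c _ rest hmem hs
      refine ⟨List.mem_cons.mpr (Or.inr ((List.dropWhile_sublist _).mem hmem)), by rw [hbc]; omega, ?_⟩
      intro d hd
      rcases mem_cases_sorted c d rest hd with hd' | hd'
      · subst hd'
        left
        rw [hbc, hhead]
        omega
      · rw [hbc, count_tail_sorted c d rest hd' hs]
        exact hall d hd'

lemma bestRun_best (cs : List Char) (hne : cs ≠ []) :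
    BestChar cs (bestRun (PySem.List.sorted cs (fun c => c.toNat)) 0 (Char.ofNat 999999)) := by
  have hperm : (PySem.List.sorted cs (fun c => c.toNat)).Perm cs :=
    PySem.List.sorted_perm cs (fun c => c.toNat) false
  have hs := PySem.List.sorted_pairwise cs (fun c => c.toNat)
  set scs := PySem.List.sorted cs (fun c => c.toNat) with hscs
  have hcnt : ∀ d : Char, PySem.List.count scs d = PySem.List.count cs d := by
    intro d
    simpa [PySem.List.count] using hperm.count_eq d
  rcases bestRun_spec scs 0 (Char.ofNat 999999) hs with ⟨_, hall⟩ | ⟨hmem, _, hall⟩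
  · exfalso
    obtain ⟨d, hd⟩ := List.exists_mem_of_ne_nil cs hne
    have hd' : d ∈ scs := hperm.mem_iff.mpr hd
    have h1 : 0 < PySem.List.count scs d := by
      simpa [PySem.List.count] using List.count_pos_iff.mpr hd'
    have := hall d hd'
    omega
  · refine ⟨hperm.mem_iff.mp hmem, ?_⟩
    intro d hd
    have hd' : d ∈ scs := hperm.mem_iff.mpr hd
    rcases hall d hd' with h | ⟨h, ho⟩
    · left; rw [← hcnt d, ← hcnt _]; exact h
    · right; exact ⟨by rw [← hcnt d, ← hcnt _]; exact h, ho⟩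

lemma sent_not_mem (s : String) (hdom : pvDomStr s = true) :
    Char.ofNat 999999 ∉ s.toList := by
  intro hmem
  have h := (List.all_eq_true.mp hdom) _ hmem
  simp only [pvDomChar] at h
  have : (Char.ofNat 999999).toNat = 999999 := by decide
  rw [this] at h
  simp at h

lemma per_string (s : String) (hdom : pvDomStr s = true) :
    String.ofList [((PySem.List.pyRange 0 (s.toList.length : Int) 1).foldl
        (fun (p : Int × Char) m => stepA s.toList p (PySem.List.pyGetD s.toList m ' '))
        ((0 : Int), Char.ofNat 999999)).2] =
    String.ofList [bestRun (PySem.List.sorted s.toList (fun c => c.toNat)) 0 (Char.ofNat 999999)] := by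
  rw [PySem.List.foldl_pyRange_zero_pyGetD' s.toList ' ' (stepA s.toList) ((0 : Int), Char.ofNat 999999)]
  by_cases hne : s.toList = []
  · rw [hne]
    rw [List.Perm.eq_nil (PySem.List.sorted_perm ([] : List Char) (fun c => c.toNat) false)]
    rw [bestRun]
    rfl
  · have hA := foldA_best s.toList (sent_not_mem s hdom) hne
    have hB := bestRun_best s.toList hne
    rw [bestChar_unique hA hB]

-- ===== VERDICT (by name: the statement is the Claim_ definition above) =====
theorem A_Ex9_spec : Claim_equal_A_Ex9 := by
  intro l hdom
  unfold Spec_A_Ex9 A_Ex9 A_Ex9_alt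
  rw [PySem.List.foldl_pyRange_zero_pyGetD' l ""
    (fun l1 (x : String) => l1 ++ [String.ofList [((PySem.List.pyRange 0 (x.toList.length : Int) 1).foldl
      (fun (p : Int × Char) m => stepA x.toList p (PySem.List.pyGetD x.toList m ' '))
      ((0 : Int), Char.ofNat 999999)).2]]) []]
  rw [PySem.List.foldl_append_singleton_eq_map]
  simp only [List.nil_append]
  refine List.map_congr_left ?_
  intro s hs
  exact per_string s ((List.all_eq_true.mp hdom) _ hs)
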